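-- pv_equiv track=rewrite | github.com/vinay-oursang-globallogic/safs-v6-smartcast-autonomous-fix | src/safs/context/syntax_compressor.py | _truncate_code_blocks
-- ===== SOURCE A (Python) =====
-- _MAX_CODE_BLOCK_LINES = 50        # Truncate code blocks beyond this many lines
--
-- def _truncate_code_blocks(lines: list[str]) -> list[str]:
--     """Truncate code blocks that exceed _MAX_CODE_BLOCK_LINES lines."""
--     result: list[str] = []
--     in_code = False
--     code_line_count = 0
--
--     for line in lines:
--         if line.strip().startswith("```"):
--             in_code = not in_code
--             code_line_count = 0
--             result.append(line)
--             continue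
--
--         if in_code:
--             code_line_count += 1
--             if code_line_count <= _MAX_CODE_BLOCK_LINES:
--                 result.append(line)
--             elif code_line_count == _MAX_CODE_BLOCK_LINES + 1:
--                 result.append("  // ... [truncated] ...")
--         else:
--             result.append(line)
--
--     return result
-- ===== SOURCE B (Python) =====
-- _MAX_CODE_BLOCK_LINES = 50
--
--
-- def _truncate_code_blocks(lines: list[str]) -> list[str]:
--     """Truncate code blocks that exceed _MAX_CODE_BLOCK_LINES lines."""
--     result: list[str] = []
--     in_code = False
--     buf: list[str] = []
--
--     def flush() -> None:
--         result.extend(buf[:_MAX_CODE_BLOCK_LINES])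
--         if len(buf) > _MAX_CODE_BLOCK_LINES:
--             result.append("  // ... [truncated] ...")
--         buf.clear()
--
--     for line in lines:
--         if line.strip().startswith("```"):
--             if in_code:
--                 flush()
--             in_code = not in_code
--             result.append(line)
--         elif in_code:
--             buf.append(line)
--         else:
--             result.append(line)
--     if in_code:
--         flush()
--     return result
-- ===== Notes on version B (the rewrite author's own statement) =====
-- stated objective: alternative
-- what changed: Replaces the per-line counter with conditional emission by a collect-block-then-slice pass: lines of a code block are buffered and flushed on the closing fence (or at end of input) as buf[:50] plus the truncation marker when the buffer overflows.
import Mathlib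
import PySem

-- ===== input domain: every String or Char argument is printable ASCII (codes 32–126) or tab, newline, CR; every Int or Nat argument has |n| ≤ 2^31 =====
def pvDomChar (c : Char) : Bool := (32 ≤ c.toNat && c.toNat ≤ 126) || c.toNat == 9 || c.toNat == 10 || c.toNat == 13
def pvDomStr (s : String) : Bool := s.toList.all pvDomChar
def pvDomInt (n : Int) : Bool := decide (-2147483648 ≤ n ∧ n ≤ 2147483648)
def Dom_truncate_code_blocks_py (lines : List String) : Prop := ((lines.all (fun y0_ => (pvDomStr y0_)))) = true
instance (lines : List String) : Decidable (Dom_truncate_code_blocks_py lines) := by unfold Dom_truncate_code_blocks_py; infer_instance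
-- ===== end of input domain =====

-- B replaces A's per-line counter + conditional emission with a collect-block-then-slice pass (buffer a block, flush on the closing fence or at end of input); alternative decomposition, same cost.

-- ===== PORT A =====
-- line.strip().startswith("```") — shared fence test, identical in both Pythons
def pvIsFence (line : String) : Bool :=
  PySem.Str.startswith (PySem.Str.strip line) "```"

def pvTruncMarker : String := "  // ... [truncated] ..."

-- A's loop: state (result, in_code, code_line_count)
def pvGoA : List String → List String → Bool → Int → List String
  | [], result, _, _ => result
  | line :: rest, result, in_code, cnt =>
    if pvIsFence line then
      pvGoA rest (result ++ [line]) (!in_code) 0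
    else if in_code then
      let cnt' := cnt + 1
      if cnt' ≤ 50 then pvGoA rest (result ++ [line]) in_code cnt'
      else if cnt' = 51 then pvGoA rest (result ++ [pvTruncMarker]) in_code cnt'
      else pvGoA rest result in_code cnt'
    else pvGoA rest (result ++ [line]) in_code cnt

def truncate_code_blocks_py (lines : List String) : List String :=
  pvGoA lines [] false 0

-- ===== PORT B =====
-- flush(): buf[:50], marker if the buffer overflowed
def pvFlush (buf : List String) : List String :=
  buf.take 50 ++ (if 50 < buf.length then [pvTruncMarker] else [])

-- B's loop: state (result, in_code, buf); final flush if still in a block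
def pvGoB : List String → List String → Bool → List String → List String
  | [], result, in_code, buf => if in_code then result ++ pvFlush buf else result
  | line :: rest, result, in_code, buf =>
    if pvIsFence line then
      if in_code then pvGoB rest (result ++ pvFlush buf ++ [line]) false []
      else pvGoB rest (result ++ [line]) true buf
    else if in_code then pvGoB rest result in_code (buf ++ [line])
    else pvGoB rest (result ++ [line]) in_code buf

def truncate_code_blocks_py_alt (lines : List String) : List String :=
  pvGoB lines [] false []

-- ===== PRECONDITION & SPEC =====
def Spec_truncate_code_blocks_py (lines : List String) (out : List String) : Prop := out = truncate_code_blocks_py_alt lines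
instance (lines : List String) (out : List String) : Decidable (Spec_truncate_code_blocks_py lines out) := by unfold Spec_truncate_code_blocks_py; infer_instance

-- ===== CLAIM (what is proved, stated in full; the proofs are below) =====
def Claim_equal_truncate_code_blocks_py : Prop := ∀ (lines : List String), Dom_truncate_code_blocks_py lines → Spec_truncate_code_blocks_py lines (truncate_code_blocks_py lines)

-- ===== LEMMAS AND PROOFS =====

-- Invariant: A's counter equals the buffer length, and A has already emitted pvFlush buf
-- of the current block; when not in a block the buffer is empty and the counter is 0.
theorem pvGoA_eq_pvGoB : ∀ (rest result buf : List String) (in_code : Bool),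
    (in_code = false → buf = []) →
    pvGoA rest (result ++ pvFlush buf) in_code (buf.length : Int) = pvGoB rest result in_code buf := by
  intro rest
  induction rest with
  | nil =>
    intro result buf in_code h
    cases in_code with
    | false => simp [pvGoA, pvGoB, h rfl, pvFlush]
    | true => simp [pvGoA, pvGoB]
  | cons line rest ih =>
    intro result buf in_code h
    by_cases hf : pvIsFence line = true
    · cases in_code with
      | true =>
        simp only [pvGoA, pvGoB, hf, if_pos, Bool.not_true]
        have := ih (result ++ pvFlush buf ++ [line]) [] false (fun _ => rfl)
        simpa [pvFlush, List.append_assoc] using this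
      | false =>
        have hb : buf = [] := h rfl
        subst hb
        simp only [pvGoA, pvGoB, hf, if_pos, Bool.not_false]
        have := ih (result ++ [line]) [] true (by intro hx; exact rfl)
        simpa [pvFlush, List.append_assoc] using this
    · cases in_code with
      | false =>
        have hb : buf = [] := h rfl
        subst hb
        simp only [pvGoA, pvGoB, hf]
        have := ih (result ++ [line]) [] false (fun _ => rfl)
        simpa [pvFlush, List.append_assoc] using this
      | true =>
        simp only [pvGoA, pvGoB, hf, if_neg, Bool.false_eq_true, not_false_eq_true, if_true]
        have ih' := ih result (buf ++ [line]) true (by intro hx; cases hx)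
        have hlen : (((buf ++ [line]).length : Nat) : Int) = (buf.length : Int) + 1 := by
          simp
        rw [hlen] at ih'
        by_cases h50 : buf.length < 50
        · -- cnt' ≤ 50: A appends the line; flush of the grown buffer is flush ++ [line]
          have hc : ((buf.length : Int) + 1) ≤ 50 := by omega
          have h1 : (buf ++ [line]).length ≤ 50 := by simp; omega
          have h2 : buf.length ≤ 50 := by omega
          have hfl : pvFlush (buf ++ [line]) = pvFlush buf ++ [line] := by
            simp only [pvFlush, List.take_of_length_le h1, List.take_of_length_le h2]
            rw [if_neg (by simp; omega : ¬ 50 < (buf ++ [line]).length),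
              if_neg (by omega : ¬ 50 < buf.length)]
            simp
          rw [hfl] at ih'
          rw [if_pos hc]
          simpa [List.append_assoc] using ih'
        · by_cases h51 : buf.length = 50
          · -- cnt' = 51: A appends the marker
            have hc : ¬ ((buf.length : Int) + 1) ≤ 50 := by omega
            have hc' : ((buf.length : Int) + 1) = 51 := by omega
            have ht : (buf ++ [line]).take 50 = buf.take 50 := List.take_append_of_le_length (by omega)
            have hfl : pvFlush (buf ++ [line]) = pvFlush buf ++ [pvTruncMarker] := by
              simp [pvFlush, ht, h51, List.take_of_length_le (by omega : buf.length ≤ 50)]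
            rw [hfl] at ih'
            rw [if_neg hc, if_pos hc']
            simpa [List.append_assoc] using ih'
          · -- cnt' > 51: A appends nothing; flush unchanged
            have hg : 50 < buf.length := by omega
            have hc : ¬ ((buf.length : Int) + 1) ≤ 50 := by omega
            have hc' : ¬ ((buf.length : Int) + 1) = 51 := by omega
            have ht : (buf ++ [line]).take 50 = buf.take 50 := List.take_append_of_le_length (by omega)
            have hg2 : 50 < (buf ++ [line]).length := by simp; omega
            have hfl : pvFlush (buf ++ [line]) = pvFlush buf := by
              simp [pvFlush, ht, hg]
              omega
            rw [hfl] at ih'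
            rw [if_neg hc, if_neg hc']
            exact ih'

-- ===== VERDICT (by name: the statement is the Claim_ definition above) =====
theorem truncate_code_blocks_py_spec : Claim_equal_truncate_code_blocks_py := by
  intro lines _
  unfold Spec_truncate_code_blocks_py truncate_code_blocks_py truncate_code_blocks_py_alt
  have := pvGoA_eq_pvGoB lines [] [] false (fun _ => rfl)
  simpa [pvFlush] using this
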